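-- pv_equiv track=rewrite | github.com/creating-comp/py_algorithms | leetcode121.py | func
-- ===== SOURCE A (Python) =====
-- from itertools import chain
--
-- def func(array):
--     map = {}
--     for i in range(len(array)):
--         ptr = i + 1
--         while ptr < len(array):
--             if array[i] not in map:
--                 map[array[i]] = []
--             map[array[i]].append(array[i]-array[ptr])
--             ptr += 1
--     merged = list(chain.from_iterable(map.values()))
--     return merged  # [1, 2, 3, 4, 5]
-- ===== SOURCE B (Python) =====
-- def func(array):
--     n = len(array)
--     idx = {}
--     for i in range(n - 1):
--         idx.setdefault(array[i], []).append(i)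
--     return [v - array[ptr] for v, ids in idx.items() for i in ids for ptr in range(i + 1, n)]
-- ===== Notes on version B (the rewrite author's own statement) =====
-- stated objective: alternative
-- what changed: Instead of building per-value difference lists inside the nested index loops, B makes one pass grouping the indices of each distinct value in first-occurrence order and a second pass that expands each stored index into its suffix of differences via a comprehension.
import Mathlib
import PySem

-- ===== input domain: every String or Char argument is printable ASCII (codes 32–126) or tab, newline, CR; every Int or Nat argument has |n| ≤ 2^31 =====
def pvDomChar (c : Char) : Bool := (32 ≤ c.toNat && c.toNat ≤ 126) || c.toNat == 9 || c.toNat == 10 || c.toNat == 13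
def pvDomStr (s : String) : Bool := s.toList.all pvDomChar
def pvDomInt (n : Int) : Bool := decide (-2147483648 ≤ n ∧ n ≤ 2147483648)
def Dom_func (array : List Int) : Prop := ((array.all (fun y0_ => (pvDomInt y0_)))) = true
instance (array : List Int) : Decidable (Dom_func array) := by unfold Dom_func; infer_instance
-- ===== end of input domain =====

-- B groups the indices of each distinct value in one pass, then emits the grouped differences in a
-- second pass; same O(n^2) output size as A, chosen as an alternative decomposition (no speed claim).

-- ===== PORT A =====
-- A's inner while-loop over ptr: ensure the key exists, then append array[i]-array[ptr] to its list.
def pvInnerA (array : List Int) (n : Int) (m : PySem.Dict Int (List Int)) (i : Int) :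
    PySem.Dict Int (List Int) :=
  (PySem.List.pyRange (i + 1) n 1).foldl (fun m ptr =>
    let k := PySem.List.pyGetD array i 0
    let m' := if m.contains k then m else m.insert k ([] : List Int)
    m'.insert k (m'.getD k [] ++ [k - PySem.List.pyGetD array ptr 0])) m

-- A: nested index loops filling a dict keyed by array[i], then chain.from_iterable of its values.
def func (array : List Int) : List Int :=
  let n : Int := (array.length : Int)
  let m : PySem.Dict Int (List Int) :=
    (PySem.List.pyRange 0 n 1).foldl (pvInnerA array n) PySem.Dict.empty
  m.values.flatten

-- ===== PORT B =====
-- B: one pass records, per distinct value, the indices where it occurs; a second pass emits the differences.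
def func_alt (array : List Int) : List Int :=
  let n : Int := (array.length : Int)
  let idx : PySem.Dict Int (List Int) :=
    (PySem.List.pyRange 0 (n - 1) 1).foldl (fun d i =>
      d.modify (PySem.List.pyGetD array i 0) [] (fun l => l ++ [i])) PySem.Dict.empty
  idx.items.flatMap (fun p => p.2.flatMap (fun i =>
    (PySem.List.pyRange (i + 1) n 1).map (fun ptr => p.1 - PySem.List.pyGetD array ptr 0)))

-- ===== PRECONDITION & SPEC =====
def Spec_func (array : List Int) (out : List Int) : Prop := out = func_alt array
instance (array : List Int) (out : List Int) : Decidable (Spec_func array out) := by unfold Spec_func; infer_instance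

-- ===== CLAIM (what is proved, stated in full; the proofs are below) =====
def Claim_equal_func : Prop := ∀ (array : List Int), Dom_func array → Spec_func array (func array)

-- ===== LEMMAS AND PROOFS =====

-- the common dict-building step, and the two pair streams the two programs fold over
def pvStep (d : PySem.Dict Int (List Int)) (p : Int × Int) : PySem.Dict Int (List Int) :=
  d.modify p.1 [] (fun l => l ++ [p.2])

def pvPairsA (arr : Int → Int) (n : Int) : List (Int × Int) :=
  (PySem.List.pyRange 0 n 1).flatMap (fun i =>
    (PySem.List.pyRange (i + 1) n 1).map (fun ptr => (arr i, arr i - arr ptr)))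

def pvPairsB (arr : Int → Int) (n : Int) : List (Int × Int) :=
  (PySem.List.pyRange 0 (n - 1) 1).map (fun i => (arr i, i))

-- A's "ensure key, then append" step is exactly a dict `modify` with default [].
theorem pv_stepA (d : PySem.Dict Int (List Int)) (k v : Int) :
    (let m' := if d.contains k then d else d.insert k ([] : List Int)
     m'.insert k (m'.getD k [] ++ [v])) = d.modify k [] (fun l => l ++ [v]) := by
  by_cases h : d.contains k = true
  · simp [h, PySem.Dict.modify]
  · simp only [Bool.not_eq_true] at h
    simp [h, PySem.Dict.modify, PySem.Dict.getD_insert_self, PySem.Dict.insert_insert_self,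
      PySem.Dict.getD_of_not_contains d [] h]

theorem pv_innerA_eq (array : List Int) (n i : Int) (m : PySem.Dict Int (List Int)) :
    pvInnerA array n m i = (PySem.List.pyRange (i + 1) n 1).foldl
      (fun m ptr => m.modify (PySem.List.pyGetD array i 0) []
        (fun l => l ++ [PySem.List.pyGetD array i 0 - PySem.List.pyGetD array ptr 0])) m := by
  unfold pvInnerA
  have h : (fun (m : PySem.Dict Int (List Int)) (ptr : Int) =>
      let k := PySem.List.pyGetD array i 0
      let m' := if m.contains k then m else m.insert k ([] : List Int)
      m'.insert k (m'.getD k [] ++ [k - PySem.List.pyGetD array ptr 0]))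
      = (fun m ptr => m.modify (PySem.List.pyGetD array i 0) []
        (fun l => l ++ [PySem.List.pyGetD array i 0 - PySem.List.pyGetD array ptr 0])) := by
    funext m ptr
    exact pv_stepA m (PySem.List.pyGetD array i 0) (PySem.List.pyGetD array i 0 - PySem.List.pyGetD array ptr 0)
  rw [h]

theorem pv_A_fold (arr : Int → Int) (n : Int) :
    (PySem.List.pyRange 0 n 1).foldl (fun m i => (PySem.List.pyRange (i + 1) n 1).foldl
        (fun m ptr => m.modify (arr i) [] (fun l => l ++ [arr i - arr ptr])) m) PySem.Dict.empty
      = (pvPairsA arr n).foldl pvStep PySem.Dict.empty := by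
  rw [pvPairsA, List.foldl_flatMap]
  simp only [List.foldl_map]
  rfl

theorem pv_B_fold (arr : Int → Int) (n : Int) :
    (PySem.List.pyRange 0 (n - 1) 1).foldl
        (fun d i => d.modify (arr i) [] (fun l => l ++ [i])) PySem.Dict.empty
      = (pvPairsB arr n).foldl pvStep PySem.Dict.empty := by
  rw [pvPairsB, List.foldl_map]
  rfl

theorem pv_keys (l : List (Int × Int)) :
    (l.foldl pvStep PySem.Dict.empty).keys = PySem.Set.ofList (l.map Prod.fst) := by
  have h1 := PySem.Dict.keys_foldl_modify_key l Prod.fst ([] : List Int)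
    (fun _ p => fun s => s ++ [p.2]) PySem.Dict.empty
  exact h1.trans (by rw [PySem.Dict.keys_empty, PySem.Set.update_nil_left])

theorem pv_nodup (l : List (Int × Int)) : (l.foldl pvStep PySem.Dict.empty).keys.Nodup := by
  have h1 := PySem.Dict.nodup_keys_foldl_modify_key l Prod.fst ([] : List Int)
    (fun _ p => fun s => s ++ [p.2]) PySem.Dict.empty
    (by rw [PySem.Dict.keys_empty]; exact List.nodup_nil)
  exact h1

theorem pv_getD (l : List (Int × Int)) (c : Int) :
    (l.foldl pvStep PySem.Dict.empty).getD c []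
      = (l.filter (fun p => p.1 == c)).map (fun p => p.2) := by
  have h1 := PySem.Dict.getD_foldl_modify_append l PySem.Dict.empty c
  exact h1.trans (by rw [PySem.Dict.getD_empty, List.nil_append])

theorem pv_rep_update (x : Int) : ∀ (m : Nat) (s : PySem.Set Int),
    PySem.Set.update s (List.replicate (m + 1) x) = PySem.Set.add s x := by
  intro m
  induction m with
  | zero => intro s; simp [PySem.Set.update_cons, PySem.Set.update_nil]
  | succ m ih =>
      intro s
      rw [List.replicate_succ, PySem.Set.update_cons, ih]
      exact PySem.Set.add_of_mem ((PySem.Set.mem_add s x x).mpr (Or.inr rfl))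

-- Updating a set with ≥1 copies of each v i, group by group, is updating with one copy each.
theorem pv_flat_update (v : Int → Int) (g : Int → Nat) :
    ∀ (r : List Int), (∀ i ∈ r, 1 ≤ g i) → ∀ s : PySem.Set Int,
      PySem.Set.update s (r.flatMap (fun i => List.replicate (g i) (v i)))
        = PySem.Set.update s (r.map v) := by
  intro r
  induction r with
  | nil => intro _ s; rfl
  | cons a t ih =>
      intro h s
      simp only [List.flatMap_cons, List.map_cons, PySem.Set.update_append, PySem.Set.update_cons]
      obtain ⟨m, hm⟩ : ∃ m, g a = m + 1 := ⟨g a - 1, by have := h a (by simp); omega⟩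
      rw [hm, pv_rep_update]
      exact ih (fun i hi => h i (List.mem_cons_of_mem _ hi)) _

theorem pv_split (n : Int) (hn1 : 1 ≤ n) :
    PySem.List.pyRange 0 n 1 = PySem.List.pyRange 0 (n - 1) 1 ++ [n - 1] := by
  rw [PySem.List.pyRange_one_append 0 (n - 1) n (by omega) (by omega)]
  congr 1
  have h := PySem.List.pyRange_one_singleton (n - 1)
  rw [show (n - 1) + 1 = n from by omega] at h
  exact h

-- the two pair streams carry the same keys in the same first-occurrence order
theorem pv_keys_eq (arr : Int → Int) (n : Int) (hn1 : 1 ≤ n) :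
    PySem.Set.ofList ((pvPairsA arr n).map Prod.fst)
      = PySem.Set.ofList ((pvPairsB arr n).map Prod.fst) := by
  rw [pvPairsA, pvPairsB, List.map_flatMap]
  simp only [List.map_map]
  have hrep : (fun i => ((PySem.List.pyRange (i + 1) n 1).map
        (Prod.fst ∘ fun ptr => (arr i, arr i - arr ptr))))
      = (fun i => List.replicate ((n - (i + 1)).toNat) (arr i)) := by
    funext i
    show (PySem.List.pyRange (i + 1) n 1).map (fun _ => arr i) = _
    rw [List.map_const', PySem.List.length_pyRange_one]
  rw [hrep]
  have hB : (PySem.List.pyRange 0 (n - 1) 1).map (Prod.fst ∘ fun i => (arr i, i))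
      = (PySem.List.pyRange 0 (n - 1) 1).map arr := rfl
  rw [hB]
  rw [pv_split n hn1, List.flatMap_append]
  have hlast : ([(n : Int) - 1].flatMap fun i => List.replicate ((n - (i + 1)).toNat) (arr i)) = [] := by
    simp only [List.flatMap_cons, List.flatMap_nil, List.append_nil]
    rw [show (n - ((n - 1) + 1)).toNat = 0 from by omega, List.replicate_zero]
  rw [hlast, List.append_nil]
  rw [← PySem.Set.update_nil_left, ← PySem.Set.update_nil_left ((PySem.List.pyRange 0 (n - 1) 1).map arr)]
  exact pv_flat_update arr _ _ (fun i hi => by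
    have h := PySem.List.mem_pyRange_one.mp hi
    omega) []

theorem pv_flatMap_filter (p : Int → Bool) (g : Int → List Int) :
    ∀ l : List Int, (l.filter p).flatMap g = l.flatMap (fun i => if p i then g i else []) := by
  intro l
  induction l with
  | nil => rfl
  | cons a t ih => by_cases h : p a <;> simp [h, ih]

-- Per key k: A's filtered difference list is B's grouped indices expanded to differences.
theorem pv_perkey (arr : Int → Int) (n k : Int) (r : List Int) :
    ((r.flatMap (fun i => (PySem.List.pyRange (i + 1) n 1).map
        (fun ptr => (arr i, arr i - arr ptr)))).filter (fun p => p.1 == k)).map (fun p => p.2)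
      = (r.filter (fun i => arr i == k)).flatMap
          (fun i => (PySem.List.pyRange (i + 1) n 1).map (fun ptr => k - arr ptr)) := by
  rw [List.filter_flatMap, List.map_flatMap, pv_flatMap_filter]
  refine List.flatMap_congr (fun i _ => ?_)
  rw [List.filter_map]
  by_cases h : arr i == k
  · have hk : arr i = k := eq_of_beq h
    simp [Function.comp_def, hk]
  · simp [Function.comp_def, h]

-- the whole equivalence, for an abstract index-to-value map `arr` and length bound n ≥ 1
theorem pv_core (arr : Int → Int) (n : Int) (hn1 : 1 ≤ n) :
    ((PySem.List.pyRange 0 n 1).foldl (fun m i => (PySem.List.pyRange (i + 1) n 1).foldl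
        (fun m ptr => m.modify (arr i) [] (fun l => l ++ [arr i - arr ptr])) m)
        PySem.Dict.empty).values.flatten
      = ((PySem.List.pyRange 0 (n - 1) 1).foldl
          (fun d i => d.modify (arr i) [] (fun l => l ++ [i])) PySem.Dict.empty).items.flatMap
          (fun p => p.2.flatMap (fun i =>
            (PySem.List.pyRange (i + 1) n 1).map (fun ptr => p.1 - arr ptr))) := by
  rw [pv_A_fold, pv_B_fold]
  rw [PySem.Dict.values_eq_map_keys _ (pv_nodup (pvPairsA arr n)) [],
    PySem.Dict.items_eq_map_keys _ (pv_nodup (pvPairsB arr n)) []]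
  rw [← List.flatMap_def, List.flatMap_map]
  rw [pv_keys (pvPairsA arr n), pv_keys (pvPairsB arr n), pv_keys_eq arr n hn1]
  refine List.flatMap_congr (fun k _ => ?_)
  show ((pvPairsA arr n).foldl pvStep PySem.Dict.empty).getD k []
      = (((pvPairsB arr n).foldl pvStep PySem.Dict.empty).getD k []).flatMap (fun i =>
          (PySem.List.pyRange (i + 1) n 1).map (fun ptr => k - arr ptr))
  rw [pv_getD, pv_getD, pvPairsA, pvPairsB]
  rw [List.filter_map, List.map_map]
  have hsnd : ((PySem.List.pyRange 0 (n - 1) 1).filter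
        ((fun p : Int × Int => p.1 == k) ∘ fun i => (arr i, i))).map
        ((fun p : Int × Int => p.2) ∘ fun i => (arr i, i))
      = (PySem.List.pyRange 0 (n - 1) 1).filter (fun i => arr i == k) := by
    show ((PySem.List.pyRange 0 (n - 1) 1).filter (fun i => arr i == k)).map (fun i => i) = _
    exact List.map_id _
  rw [hsnd]
  rw [pv_split n hn1, List.flatMap_append, List.filter_append, List.map_append]
  have hlast : (([(n : Int) - 1].flatMap fun i => (PySem.List.pyRange (i + 1) n 1).map
      (fun ptr => (arr i, arr i - arr ptr))).filter (fun p => p.1 == k)).map (fun p => p.2) = [] := by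
    simp only [List.flatMap_cons, List.flatMap_nil, List.append_nil]
    rw [PySem.List.pyRange_one_eq_nil (show n ≤ (n - 1) + 1 from by omega)]
    rfl
  rw [hlast, List.append_nil, pv_perkey arr n k]

theorem pv_main (array : List Int) : func array = func_alt array := by
  rcases array with _ | ⟨a, t⟩
  · rfl
  · have hfold : (PySem.List.pyRange 0 ((a :: t).length : Int) 1).foldl
        (pvInnerA (a :: t) ((a :: t).length : Int)) PySem.Dict.empty
        = (PySem.List.pyRange 0 ((a :: t).length : Int) 1).foldl (fun m i =>
          (PySem.List.pyRange (i + 1) ((a :: t).length : Int) 1).foldl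
            (fun m ptr => m.modify (PySem.List.pyGetD (a :: t) i 0) []
              (fun l => l ++ [PySem.List.pyGetD (a :: t) i 0 - PySem.List.pyGetD (a :: t) ptr 0])) m)
          PySem.Dict.empty := by
      have h : pvInnerA (a :: t) ((a :: t).length : Int) = (fun m i =>
          (PySem.List.pyRange (i + 1) ((a :: t).length : Int) 1).foldl
            (fun m ptr => m.modify (PySem.List.pyGetD (a :: t) i 0) []
              (fun l => l ++ [PySem.List.pyGetD (a :: t) i 0 - PySem.List.pyGetD (a :: t) ptr 0])) m) := by
        funext m i
        exact pv_innerA_eq (a :: t) ((a :: t).length : Int) i m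
      rw [h]
    show ((PySem.List.pyRange 0 ((a :: t).length : Int) 1).foldl
        (pvInnerA (a :: t) ((a :: t).length : Int)) PySem.Dict.empty).values.flatten = _
    rw [hfold]
    have hn1 : 1 ≤ ((a :: t).length : Int) := by
      simp only [List.length_cons]
      push_cast
      omega
    exact pv_core (fun i => PySem.List.pyGetD (a :: t) i 0) ((a :: t).length : Int) hn1

-- ===== VERDICT (by name: the statement is the Claim_ definition above) =====
theorem func_spec : Claim_equal_func := by
  intro array _
  unfold Spec_func
  exact pv_main array
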